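-- pv_equiv track=rewrite | github.com/liamhays/hpex | src/hpex/helpers.py | kermit_line_to_progress
-- ===== SOURCE A (Python) =====
-- def kermit_line_to_progress(dat):
--     try:
--         if '%' in dat:
--             spl = dat.split()
--             for l in spl:
--                 if '%' in l:
--                     return int(l.replace('%', ''))
--     except ValueError:
--         pass
-- ===== SOURCE B (Python) =====
-- def kermit_line_to_progress(dat):
--     # Locate the first '%' directly and widen to the surrounding whitespace-
--     # delimited token, instead of splitting the whole line and scanning tokens.
--     pre, sep, post = dat.partition('%')
--     if not sep:
--         return None
--     left = []
--     for ch in reversed(pre):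
--         if ch.isspace():
--             break
--         left.append(ch)
--     left.reverse()
--     tok = ''.join(left) + sep
--     for ch in post:
--         if ch.isspace():
--             break
--         tok += ch
--     try:
--         return int(tok.replace('%', ''))
--     except ValueError:
--         return None
-- ===== Notes on version B (the rewrite author's own statement) =====
-- stated objective: alternative
-- what changed: Instead of splitting the whole line into tokens and scanning them for '%', B partitions at the first '%' and widens left/right to the whitespace boundaries of that single token, then parses it.
import Mathlib
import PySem

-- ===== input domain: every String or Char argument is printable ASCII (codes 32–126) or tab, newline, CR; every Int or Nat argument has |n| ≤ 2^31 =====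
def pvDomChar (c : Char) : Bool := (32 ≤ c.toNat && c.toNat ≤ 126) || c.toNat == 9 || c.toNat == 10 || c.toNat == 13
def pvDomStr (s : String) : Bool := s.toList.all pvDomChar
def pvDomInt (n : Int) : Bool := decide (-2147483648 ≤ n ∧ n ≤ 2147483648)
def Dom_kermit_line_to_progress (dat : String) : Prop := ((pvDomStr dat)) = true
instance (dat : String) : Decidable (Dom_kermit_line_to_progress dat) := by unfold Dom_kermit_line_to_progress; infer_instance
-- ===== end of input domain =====

-- B locates the first '%' and widens to that token's whitespace boundaries instead of
-- splitting the whole line and scanning tokens (alternative decomposition, same cost).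

-- ===== PORT A =====
-- for l in spl: if '%' in l: return int(l.replace('%','')); the try/except ValueError
-- around the int() is the `none` of ofStr?.
def kermitLoopA : List String → Option Int
  | [] => none
  | l :: rest =>
    if PySem.Str.isIn "%" l then PySem.Int.ofStr? (PySem.Str.replace l "%" "")
    else kermitLoopA rest

def kermit_line_to_progress (dat : String) : Option Int :=
  if PySem.Str.isIn "%" dat then kermitLoopA (PySem.Str.split₀ dat)
  else none

-- ===== PORT B =====
-- pre, sep, post = dat.partition('%')  →  span at the first '%' of the char list;
-- the two boundary loops with `break` are takeWhile on post / on reversed pre.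
def kermit_line_to_progress_alt (dat : String) : Option Int :=
  let cs := dat.toList
  let pre := cs.takeWhile (· ≠ '%')
  match cs.dropWhile (· ≠ '%') with
  | [] => none
  | _ :: post =>
    let tok := (pre.reverse.takeWhile (fun c => !PySem.Chars.isspace c)).reverse
               ++ '%' :: post.takeWhile (fun c => !PySem.Chars.isspace c)
    PySem.Int.ofChars? (PySem.Chars.replace tok ['%'] [])

-- ===== PRECONDITION & SPEC =====
def Spec_kermit_line_to_progress (dat : String) (out : Option Int) : Prop := out = kermit_line_to_progress_alt dat
instance (dat : String) (out : Option Int) : Decidable (Spec_kermit_line_to_progress dat out) := by unfold Spec_kermit_line_to_progress; infer_instance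

-- ===== CLAIM (what is proved, stated in full; the proofs are below) =====
def Claim_equal_kermit_line_to_progress : Prop := ∀ (dat : String), Dom_kermit_line_to_progress dat → Spec_kermit_line_to_progress dat (kermit_line_to_progress dat)

-- ===== LEMMAS AND PROOFS =====

-- the A-side token loop, on char lists
def kermitLoopC : List (List Char) → Option Int
  | [] => none
  | t :: ts =>
    if PySem.Chars.isIn ['%'] t then PySem.Int.ofChars? (PySem.Chars.replace t ['%'] [])
    else kermitLoopC ts

-- what B computes, generalized over a partially-built current token (reversed), used
-- as the invariant while walking split₀.go
def kermitBAux (cs curRev : List Char) : Option Int :=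
  let pre := cs.takeWhile (· ≠ '%')
  match cs.dropWhile (· ≠ '%') with
  | [] => none
  | _ :: post =>
    PySem.Int.ofChars? (PySem.Chars.replace
      (((pre.reverse ++ curRev).takeWhile (fun c => !PySem.Chars.isspace c)).reverse
        ++ '%' :: post.takeWhile (fun c => !PySem.Chars.isspace c)) ['%'] [])

theorem takeWhile_append_cons_of_neg {α : Type} (p : α → Bool) (c : α) (hc : p c = false)
    (l l' : List α) : (l ++ c :: l').takeWhile p = l.takeWhile p := by
  induction l with
  | nil => simp [List.takeWhile, hc]
  | cons a t ih =>
    simp only [List.cons_append, List.takeWhile]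
    cases p a <;> simp [ih]

theorem isIn_singleton_iff_mem (c : Char) (l : List Char) :
    PySem.Chars.isIn [c] l = true ↔ c ∈ l := by
  rw [PySem.Chars.isIn_iff_infix]
  constructor
  · intro h; exact h.subset (List.mem_singleton_self c)
  · intro h
    obtain ⟨s, t, rfl⟩ := List.mem_iff_append.mp h
    exact ⟨s, t, by simp⟩

theorem go_acc : ∀ (cs cur : List Char) (acc : List (List Char)),
    PySem.Chars.split₀.go cs cur acc = acc.reverse ++ PySem.Chars.split₀.go cs cur [] := by
  intro cs
  induction cs with
  | nil =>
    intro cur acc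
    simp only [PySem.Chars.split₀.go]
    cases cur <;> simp
  | cons c rest ih =>
    intro cur acc
    simp only [PySem.Chars.split₀.go]
    by_cases hs : PySem.Chars.isspace c = true
    · simp only [hs, if_pos]
      cases cur with
      | nil => simp [ih [] acc]
      | cons a t =>
        simp only [List.isEmpty_cons, if_neg, Bool.false_eq_true, not_false_iff]
        rw [ih [] ((a :: t).reverse :: acc), ih [] [(a :: t).reverse]]
        simp
    · simp only [hs, if_neg, Bool.false_eq_true, not_false_iff]
      exact ih _ acc

theorem go_first : ∀ (cs cur : List Char), cur ≠ [] →
    PySem.Chars.split₀.go cs cur [] =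
      (cur.reverse ++ cs.takeWhile (fun c => !PySem.Chars.isspace c)) ::
        PySem.Chars.split₀ (cs.dropWhile (fun c => !PySem.Chars.isspace c)) := by
  intro cs
  induction cs with
  | nil =>
    intro cur h
    simp only [PySem.Chars.split₀.go, List.takeWhile_nil, List.dropWhile_nil]
    rw [if_neg (by simpa using h)]
    simp [PySem.Chars.split₀, PySem.Chars.split₀.go]
  | cons c rest ih =>
    intro cur h
    by_cases hs : PySem.Chars.isspace c = true
    · simp only [PySem.Chars.split₀.go, hs, if_pos]
      rw [if_neg (by simpa using h)]
      rw [go_acc rest []]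
      have htw : List.takeWhile (fun c => !PySem.Chars.isspace c) (c :: rest) = [] := by
        simp [List.takeWhile, hs]
      have hdw : List.dropWhile (fun c => !PySem.Chars.isspace c) (c :: rest) = c :: rest := by
        simp [List.dropWhile, hs]
      rw [htw, hdw]
      have : PySem.Chars.split₀ (c :: rest) = PySem.Chars.split₀ rest := by
        simp [PySem.Chars.split₀, PySem.Chars.split₀.go, hs]
      rw [this]
      simp [PySem.Chars.split₀]
    · have hb : (!PySem.Chars.isspace c) = true := by simp [hs]
      simp only [PySem.Chars.split₀.go, hs, Bool.false_eq_true, if_neg, not_false_iff]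
      rw [ih (c :: cur) (by simp)]
      simp [List.takeWhile, List.dropWhile, hb]

-- the heart: walking A's split₀.go with a '%'-free, all-nonspace current token gives B's value
theorem loop_go (cs : List Char) : ∀ (curRev : List Char),
    '%' ∉ curRev → (∀ c ∈ curRev, PySem.Chars.isspace c = false) →
    kermitLoopC (PySem.Chars.split₀.go cs curRev []) = kermitBAux cs curRev := by
  induction cs with
  | nil =>
    intro curRev h1 _
    simp only [PySem.Chars.split₀.go, kermitBAux, List.dropWhile_nil]
    cases curRev with
    | nil => simp [kermitLoopC]
    | cons a t =>
      rw [if_neg (by simp)]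
      have hfalse : PySem.Chars.isIn ['%'] (t.reverse ++ [a]) = false := by
        rw [Bool.eq_false_iff]
        simp only [ne_eq, isIn_singleton_iff_mem, List.mem_append, List.mem_reverse,
          List.mem_singleton]
        intro hmem
        rcases hmem with h | h
        · exact h1 (List.mem_cons_of_mem a h)
        · exact h1 (h ▸ List.mem_cons_self)
      simp [kermitLoopC, hfalse]
  | cons c rest ih =>
    intro curRev h1 h2
    by_cases hp : c = '%'
    · subst hp
      have hs : PySem.Chars.isspace '%' = false := by decide
      simp only [PySem.Chars.split₀.go, hs, Bool.false_eq_true, if_neg, not_false_iff]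
      rw [go_first rest ('%' :: curRev) (by simp)]
      simp only [kermitLoopC]
      rw [if_pos (by simp [isIn_singleton_iff_mem])]
      simp only [kermitBAux, List.takeWhile, List.dropWhile]
      have hcur : curRev.takeWhile (fun c => !PySem.Chars.isspace c) = curRev :=
        List.takeWhile_eq_self_iff.mpr (by intro a ha; simp [h2 a ha])
      simp [hcur]
    · have hpd : (decide ¬(c = '%')) = true := by simp [hp]
      by_cases hs : PySem.Chars.isspace c = true
      · simp only [PySem.Chars.split₀.go, hs, if_pos]
        have key : kermitLoopC (PySem.Chars.split₀.go rest [] []) = kermitBAux rest [] :=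
          ih [] (by simp) (by simp)
        have step : ∀ acc1 : List Char, '%' ∉ acc1 →
            kermitLoopC (PySem.Chars.split₀.go rest [] [acc1]) = kermitBAux rest [] := by
          intro acc1 hacc
          rw [go_acc rest [] [acc1]]
          simp only [List.reverse_cons, List.reverse_nil, List.nil_append, List.singleton_append,
            kermitLoopC]
          rw [if_neg (by simpa [isIn_singleton_iff_mem] using hacc)]
          exact key
        have hres : kermitLoopC (if curRev.isEmpty = true
              then PySem.Chars.split₀.go rest [] []
              else PySem.Chars.split₀.go rest [] [curRev.reverse]) = kermitBAux rest [] := by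
          cases curRev with
          | nil => simpa using key
          | cons a t =>
            simp only [List.isEmpty_cons, Bool.false_eq_true, if_neg, not_false_iff]
            exact step (a :: t).reverse (by simp only [List.mem_reverse]; exact h1)
        rw [hres]
        -- kermitBAux (c :: rest) curRev = kermitBAux rest []
        simp only [kermitBAux, List.takeWhile, List.dropWhile, hpd]
        cases hdw : List.dropWhile (fun x => decide ¬(x = '%')) rest with
        | nil => simp
        | cons d post =>
          simp only []
          have : ((List.takeWhile (fun x => decide ¬(x = '%')) rest).reverse ++ c :: curRev).takeWhile
                (fun c => !PySem.Chars.isspace c)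
              = ((List.takeWhile (fun x => decide ¬(x = '%')) rest).reverse ++ ([] : List Char)).takeWhile
                (fun c => !PySem.Chars.isspace c) := by
            rw [takeWhile_append_cons_of_neg _ c (by simp [hs])]
            simp
          rw [List.reverse_cons, List.append_assoc, List.singleton_append, this]
      · have hb : (!PySem.Chars.isspace c) = true := by simp [hs]
        simp only [PySem.Chars.split₀.go, hs, Bool.false_eq_true, if_neg, not_false_iff]
        rw [ih (c :: curRev) (by
          intro hmem
          rcases List.mem_cons.mp hmem with h | h
          · exact hp h.symm
          · exact h1 h) (by
          intro a ha
          rcases List.mem_cons.mp ha with rfl | ha'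
          · simpa using hs
          · exact h2 a ha')]
        -- kermitBAux (c :: rest) curRev = kermitBAux rest (c :: curRev)
        simp only [kermitBAux, List.takeWhile, List.dropWhile, hpd]
        cases hdw : List.dropWhile (fun x => decide ¬(x = '%')) rest with
        | nil => simp
        | cons d post =>
          simp only [List.reverse_cons, List.append_assoc, List.singleton_append]

theorem loopA_map (ts : List (List Char)) :
    kermitLoopA (ts.map String.ofList) = kermitLoopC ts := by
  induction ts with
  | nil => rfl
  | cons t rest ih =>
    simp only [List.map_cons, kermitLoopA, kermitLoopC, PySem.Str.isIn_eq, String.toList_ofList]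
    have : ("%" : String).toList = ['%'] := by decide
    rw [this]
    by_cases h : PySem.Chars.isIn ['%'] t = true
    · rw [if_pos h, if_pos h, PySem.Int.ofStr?, PySem.Str.toList_replace, String.toList_ofList]
      rfl
    · rw [if_neg h, if_neg h, ih]

theorem alt_eq_aux (dat : String) : kermit_line_to_progress_alt dat = kermitBAux dat.toList [] := by
  simp only [kermit_line_to_progress_alt, kermitBAux, List.append_nil]

-- ===== VERDICT (by name: the statement is the Claim_ definition above) =====
theorem kermit_line_to_progress_spec : Claim_equal_kermit_line_to_progress := by
  intro dat _
  unfold Spec_kermit_line_to_progress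
  rw [alt_eq_aux]
  unfold kermit_line_to_progress
  have hmain : kermitLoopC (PySem.Chars.split₀ dat.toList) = kermitBAux dat.toList [] :=
    loop_go dat.toList [] (by simp) (by simp)
  by_cases h : PySem.Str.isIn "%" dat = true
  · rw [if_pos h]
    have : PySem.Str.split₀ dat = (PySem.Chars.split₀ dat.toList).map String.ofList := rfl
    rw [this, loopA_map, hmain]
  · rw [if_neg h]
    have hmem : '%' ∉ dat.toList := by
      rw [PySem.Str.isIn_eq] at h
      have : ("%" : String).toList = ['%'] := by decide
      rw [this] at h
      simpa [isIn_singleton_iff_mem] using h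
    have hdw : dat.toList.dropWhile (· ≠ '%') = [] := by
      rw [List.dropWhile_eq_nil_iff]
      intro x hx
      simp only [ne_eq, decide_eq_true_eq]
      rintro rfl; exact hmem hx
    simp only [kermitBAux]
    rw [hdw]
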